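-- pv_equiv track=rewrite | github.com/korobopolly/python | 모의3-초기코드/문제2.py | solution
-- ===== SOURCE A (Python) =====
-- def solution(answer, choices):
--     score = 0
--     for choice in choices:
--         is_exist = False
--         for a in answer:
--             if choice == a:
--                 is_exist = True
--         if is_exist:
--             score += 1
--         else:
--             score -= 1
--     if score < 0:
--         score=0
--     return score
-- ===== SOURCE B (Python) =====
-- def solution(answer, choices):
--     # Tally choices once, then read off the tallies per distinct answer value.
--     cnt = {}
--     for c in choices:
--         cnt[c] = cnt.get(c, 0) + 1
--     present = sum(cnt.get(v, 0) for v in dict.fromkeys(answer))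
--     return max(0, 2 * present - len(choices))
-- ===== Notes on version B (the rewrite author's own statement) =====
-- stated objective: faster
-- what changed: Inverts A's traversal: instead of scanning answer for every choice with a +1/-1 accumulator, B builds a frequency counter of choices once, sums the counts over the distinct answer values, and derives the score in closed form as max(0, 2*present - len(choices)).
import Mathlib
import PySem

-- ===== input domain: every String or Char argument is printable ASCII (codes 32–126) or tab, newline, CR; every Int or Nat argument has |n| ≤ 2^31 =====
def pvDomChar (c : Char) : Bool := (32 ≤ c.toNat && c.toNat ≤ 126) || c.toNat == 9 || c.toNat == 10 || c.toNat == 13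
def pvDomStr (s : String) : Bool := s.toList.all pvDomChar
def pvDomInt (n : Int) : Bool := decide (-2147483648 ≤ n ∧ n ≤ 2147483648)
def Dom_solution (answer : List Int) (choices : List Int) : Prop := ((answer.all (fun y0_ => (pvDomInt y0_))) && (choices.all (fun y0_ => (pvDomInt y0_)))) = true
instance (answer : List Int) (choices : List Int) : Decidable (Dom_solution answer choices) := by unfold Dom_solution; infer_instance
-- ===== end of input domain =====

-- B inverts A's traversal: a frequency counter of choices built once, counts summed over the
-- distinct answer values, and the clamped score in closed form max(0, 2*present - len(choices)) (objective: faster).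


-- ===== PORT A =====
def solution (answer : List Int) (choices : List Int) : Int :=
  let score := choices.foldl (fun score choice =>
    let is_exist := answer.foldl (fun is_exist a => if choice == a then true else is_exist) false
    if is_exist then score + 1 else score - 1) 0
  if score < 0 then 0 else score

-- ===== PORT B =====
def solution_alt (answer : List Int) (choices : List Int) : Int :=
  let cnt : PySem.Dict Int Int :=
    choices.foldl (fun d c => d.insert c (d.getD c 0 + 1)) PySem.Dict.empty
  let present : Int := ((PySem.List.dedup answer).map (fun v => cnt.getD v 0)).sum
  max 0 (2 * present - (choices.length : Int))

-- ===== PRECONDITION & SPEC =====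
def Spec_solution (answer : List Int) (choices : List Int) (out : Int) : Prop := out = solution_alt answer choices
instance (answer : List Int) (choices : List Int) (out : Int) : Decidable (Spec_solution answer choices out) := by unfold Spec_solution; infer_instance

-- ===== CLAIM =====
def Claim_equal_solution : Prop := ∀ (answer : List Int) (choices : List Int), Dom_solution answer choices → Spec_solution answer choices (solution answer choices)

-- ===== LEMMAS AND PROOFS =====

-- A's inner loop computes plain membership.
theorem inner_fold_eq_mem (answer : List Int) (choice : Int) (b : Bool) :
    answer.foldl (fun is_exist a => if choice == a then true else is_exist) b
      = (b || decide (choice ∈ answer)) := by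
  induction answer generalizing b with
  | nil => simp
  | cons a t ih =>
    simp only [List.foldl_cons, List.mem_cons, ih]
    by_cases h : choice = a <;> simp [h]

-- A's outer loop in closed form.
theorem outer_fold_closed (answer choices : List Int) (s : Int) :
    choices.foldl (fun score choice =>
      let is_exist := answer.foldl (fun is_exist a => if choice == a then true else is_exist) false
      if is_exist then score + 1 else score - 1) s
      = s + 2 * (choices.countP (fun c => decide (c ∈ answer)) : Int) - (choices.length : Int) := by
  induction choices generalizing s with
  | nil => simp
  | cons c t ih =>
    have hb := inner_fold_eq_mem answer c false
    rw [Bool.false_or] at hb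
    rw [List.foldl_cons, ih, List.countP_cons, List.length_cons]
    simp only [hb]
    by_cases h : c ∈ answer <;> simp [h] <;> omega

-- Summing an indicator over a duplicate-free list is one membership test.
theorem sum_indicator_nodup (ds : List Int) (c : Int) (hnd : ds.Nodup) :
    (ds.map (fun v => if v = c then (1 : Int) else 0)).sum = (if c ∈ ds then 1 else 0) := by
  induction ds with
  | nil => simp
  | cons d t ih =>
    rcases List.nodup_cons.mp hnd with ⟨hd, ht⟩
    simp only [List.map_cons, List.sum_cons, ih ht, List.mem_cons]
    by_cases h : d = c
    · subst h; simp [hd]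
    · simp [h, Ne.symm h]

-- Summing per-value tallies of xs over a duplicate-free value list counts members of xs.
theorem sum_map_count (ds xs : List Int) (hnd : ds.Nodup) :
    (ds.map (fun v => ((xs.count v : Nat) : Int))).sum
      = (xs.countP (fun x => decide (x ∈ ds)) : Int) := by
  induction xs with
  | nil => simp
  | cons c t ih =>
    have hsplit : (ds.map (fun v => (((c :: t).count v : Nat) : Int))).sum
        = (ds.map (fun v => ((t.count v : Nat) : Int))).sum
          + (ds.map (fun v => if v = c then (1 : Int) else 0)).sum := by
      rw [← PySem.List.sum_map_add_int]
      congr 1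
      apply List.map_congr_left
      intro v _
      rw [List.count_cons]
      by_cases h : v = c <;> simp [h] <;> omega
    rw [hsplit, ih, sum_indicator_nodup ds c hnd, List.countP_cons]
    by_cases h : c ∈ ds <;> simp [h]

-- ===== VERDICT =====
theorem solution_spec : Claim_equal_solution := by
  intro answer choices _
  unfold Spec_solution solution solution_alt
  have hget : ∀ v : Int,
      (choices.foldl (fun d c => d.insert c (d.getD c 0 + 1)) PySem.Dict.empty).getD v 0
        = (choices.count v : Int) := by
    intro v
    rw [PySem.Dict.getD_foldl_insert_add_one]
    simp [PySem.Dict.getD_empty]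
  have hsum : ((PySem.List.dedup answer).map
      (fun v => (choices.foldl (fun d c => d.insert c (d.getD c 0 + 1)) PySem.Dict.empty).getD v 0)).sum
      = (choices.countP (fun c => decide (c ∈ answer)) : Int) := by
    have h1 : ((PySem.List.dedup answer).map
        (fun v => (choices.foldl (fun d c => d.insert c (d.getD c 0 + 1)) PySem.Dict.empty).getD v 0)).sum
        = ((PySem.List.dedup answer).map (fun v => ((choices.count v : Nat) : Int))).sum := by
      congr 1
      apply List.map_congr_left
      intro v _
      exact hget v
    rw [h1, sum_map_count _ _ (PySem.List.nodup_dedup answer)]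
    congr 1
    apply List.countP_congr
    intro c _
    simp
  simp only [outer_fold_closed, zero_add, hsum]
  rw [max_def]
  split_ifs <;> omega
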